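-- pv_equiv track=rewrite | github.com/KotisKotlyandii/lessons1 | ege22/147.py | f
-- ===== SOURCE A (Python) =====
-- def f(x):
--     a,b = 0,10
--     while x > 0:
--         d = x % 9
--         if d > a: a = d
--         if d < b: b = d
--         x //= 9
--     return a*b
-- ===== SOURCE B (Python) =====
-- def f(x):
--     seen = [False] * 9
--     while x > 0:
--         seen[x % 9] = True
--         x //= 9
--     if True not in seen:
--         return 0
--     lo = seen.index(True)
--     hi = 8 - seen[::-1].index(True)
--     return hi * lo
-- ===== Notes on version B (the rewrite author's own statement) =====
-- stated objective: alternative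
-- what changed: B marks which base-9 digits occur in a fixed 9-slot presence table (no comparisons during the digit scan), then reads the min digit as the first marked slot and the max digit as the last marked slot, instead of A's running max/min trackers with sentinel initial values.
import Mathlib
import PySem

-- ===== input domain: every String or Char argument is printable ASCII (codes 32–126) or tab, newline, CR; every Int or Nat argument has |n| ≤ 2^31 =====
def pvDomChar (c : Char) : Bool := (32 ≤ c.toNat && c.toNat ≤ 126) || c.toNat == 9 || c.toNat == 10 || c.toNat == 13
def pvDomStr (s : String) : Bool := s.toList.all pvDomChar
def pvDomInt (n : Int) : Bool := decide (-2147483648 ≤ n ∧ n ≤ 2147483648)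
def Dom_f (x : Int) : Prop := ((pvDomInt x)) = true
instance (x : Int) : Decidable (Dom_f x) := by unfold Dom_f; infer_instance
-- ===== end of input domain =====

-- B replaces A's running max/min trackers by a fixed 9-slot presence table of the base-9
-- digits, reading the min as the first marked slot and the max as the last (alternative,
-- not faster); same value for every int.

-- ===== PORT A =====
-- A's while loop: running max a (init 0) and running min b (init 10) over base-9 digits.
def fLoopA (a b x : Int) : Int :=
  if _h : x > 0 then
    let d := PySem.Int.mod x 9
    let a' := if d > a then d else a
    let b' := if d < b then d else b
    fLoopA a' b' (PySem.Int.floordiv x 9)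
  else a * b
termination_by x.toNat
decreasing_by
  have h9 : PySem.Int.floordiv x 9 = x / 9 := PySem.Int.floordiv_eq_ediv_of_pos (by omega)
  have h1 : 0 ≤ x / 9 := Int.ediv_nonneg (by omega) (by omega)
  have h2 : x / 9 < x := by rw [Int.ediv_lt_iff_lt_mul (by norm_num)]; omega
  omega

def f (x : Int) : Int := fLoopA 0 10 x

-- ===== PORT B =====
-- B's marking loop: seen[x % 9] = True; x //= 9   (0 ≤ x % 9 < 9 when x > 0, so pySetD is exact)
def markLoop (seen : List Bool) (x : Int) : List Bool :=
  if _h : x > 0 then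
    markLoop (PySem.List.pySetD seen (PySem.Int.mod x 9) true) (PySem.Int.floordiv x 9)
  else seen
termination_by x.toNat
decreasing_by
  have h9 : PySem.Int.floordiv x 9 = x / 9 := PySem.Int.floordiv_eq_ediv_of_pos (by omega)
  have h1 : 0 ≤ x / 9 := Int.ediv_nonneg (by omega) (by omega)
  have h2 : x / 9 < x := by rw [Int.ediv_lt_iff_lt_mul (by norm_num)]; omega
  omega

def f_alt (x : Int) : Int :=
  let seen := markLoop (List.replicate 9 false) x
  if seen.contains true = false then 0
  else
    -- seen.index(True): the membership test above guarantees a hit, so .getD 0 is exact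
    let lo : Int := ((PySem.List.index? seen true).getD 0 : Nat)
    -- seen[::-1] is slice? with step -1, which always returns (step ≠ 0), so .getD [] is exact
    let hi : Int := 8 - (((PySem.List.index? ((PySem.List.slice? seen none none (-1)).getD []) true).getD 0 : Nat) : Int)
    hi * lo

-- ===== PRECONDITION & SPEC =====
def Spec_f (x : Int) (out : Int) : Prop := out = f_alt x
instance (x : Int) (out : Int) : Decidable (Spec_f x out) := by unfold Spec_f; infer_instance

-- ===== CLAIM =====
def Claim_equal_f : Prop := ∀ (x : Int), Dom_f x → Spec_f x (f x)

-- ===== LEMMAS AND PROOFS =====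

-- proof-only helper: the base-9 digit list of x (least significant first)
def pvDigits (x : Int) : List Int :=
  if _h : x > 0 then PySem.Int.mod x 9 :: pvDigits (PySem.Int.floordiv x 9) else []
termination_by x.toNat
decreasing_by
  have h9 : PySem.Int.floordiv x 9 = x / 9 := PySem.Int.floordiv_eq_ediv_of_pos (by omega)
  have h1 : 0 ≤ x / 9 := Int.ediv_nonneg (by omega) (by omega)
  have h2 : x / 9 < x := by rw [Int.ediv_lt_iff_lt_mul (by norm_num)]; omega
  omega

theorem pv_mod9_bounds (x : Int) (hx : 0 < x) :
    0 ≤ PySem.Int.mod x 9 ∧ PySem.Int.mod x 9 ≤ 8 := by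
  rw [PySem.Int.mod_eq_emod_of_pos (by omega)]
  have := Int.emod_nonneg x (by norm_num : (9:Int) ≠ 0)
  have := Int.emod_lt_of_pos x (by norm_num : (0:Int) < 9)
  omega

theorem pv_loop_eq_folds (n : Nat) : ∀ (x a b : Int), x.toNat ≤ n →
    fLoopA a b x = ((pvDigits x).foldl max a) * ((pvDigits x).foldl min b) := by
  induction n with
  | zero =>
    intro x a b _hx
    have hle : ¬ x > 0 := by omega
    rw [fLoopA, pvDigits]
    simp [hle]
  | succ n ih =>
    intro x a b _hx
    by_cases h : x > 0
    · have hdec : (PySem.Int.floordiv x 9).toNat ≤ n := by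
        have h9 : PySem.Int.floordiv x 9 = x / 9 := PySem.Int.floordiv_eq_ediv_of_pos (by omega)
        have h1 : 0 ≤ x / 9 := Int.ediv_nonneg (by omega) (by omega)
        have h2 : x / 9 < x := by rw [Int.ediv_lt_iff_lt_mul (by norm_num)]; omega
        omega
      rw [fLoopA, pvDigits]
      simp only [h, dite_true, List.foldl_cons]
      rw [ih _ _ _ hdec]
      congr 1
      · congr 1
        rcases le_or_gt (PySem.Int.mod x 9) a with hc | hc
        · simp [max_def]; omega
        · simp [max_def]; omega
      · congr 1
        rcases le_or_gt b (PySem.Int.mod x 9) with hc | hc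
        · simp [min_def]; omega
        · simp [min_def]; omega
    · rw [fLoopA, pvDigits]; simp [h]

theorem pv_digits_bounds (n : Nat) : ∀ (x : Int), x.toNat ≤ n →
    ∀ y ∈ pvDigits x, 0 ≤ y ∧ y ≤ 8 := by
  induction n with
  | zero =>
    intro x _ y hy
    rw [pvDigits] at hy
    have hle : ¬ x > 0 := by omega
    simp [hle] at hy
  | succ n ih =>
    intro x _hx y hy
    by_cases h : x > 0
    · rw [pvDigits] at hy
      simp only [h, dite_true, List.mem_cons] at hy
      rcases hy with rfl | hy
      · exact pv_mod9_bounds x h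
      · have hdec : (PySem.Int.floordiv x 9).toNat ≤ n := by
          have h9 : PySem.Int.floordiv x 9 = x / 9 := PySem.Int.floordiv_eq_ediv_of_pos (by omega)
          have h1 : 0 ≤ x / 9 := Int.ediv_nonneg (by omega) (by omega)
          have h2 : x / 9 < x := by rw [Int.ediv_lt_iff_lt_mul (by norm_num)]; omega
          omega
        exact ih _ hdec y hy
    · rw [pvDigits] at hy; simp [h] at hy

-- the marking loop, pointwise: slot d ends up true iff it started true or d is a digit of x
theorem pv_mark_getD (n : Nat) : ∀ (x : Int) (seen : List Bool), x.toNat ≤ n → seen.length = 9 →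
    (markLoop seen x).length = 9 ∧
    ∀ d : Nat, d < 9 →
      (markLoop seen x).getD d false = (seen.getD d false || decide ((d : Int) ∈ pvDigits x)) := by
  induction n with
  | zero =>
    intro x seen _hx hlen
    have hle : ¬ x > 0 := by omega
    rw [markLoop, pvDigits]
    simp [hle, hlen]
  | succ n ih =>
    intro x seen hx hlen
    by_cases h : x > 0
    · have hm := pv_mod9_bounds x h
      have hdec : (PySem.Int.floordiv x 9).toNat ≤ n := by
        have h9 : PySem.Int.floordiv x 9 = x / 9 := PySem.Int.floordiv_eq_ediv_of_pos (by omega)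
        have h1 : 0 ≤ x / 9 := Int.ediv_nonneg (by omega) (by omega)
        have h2 : x / 9 < x := by rw [Int.ediv_lt_iff_lt_mul (by norm_num)]; omega
        omega
      have hset : PySem.List.pySetD seen (PySem.Int.mod x 9) true
          = seen.set (PySem.Int.mod x 9).toNat true :=
        PySem.List.pySetD_of_nonneg _ _ hm.1
      have hlen' : (seen.set (PySem.Int.mod x 9).toNat true).length = 9 := by
        simp [hlen]
      obtain ⟨hL, hG⟩ := ih (PySem.Int.floordiv x 9) _ hdec hlen'
      rw [markLoop, pvDigits]
      simp only [h, dite_true]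
      rw [hset]
      refine ⟨hL, ?_⟩
      intro d hd
      rw [hG d hd]
      have hmn : (PySem.Int.mod x 9).toNat < seen.length := by omega
      have hcast : ((PySem.Int.mod x 9).toNat : Int) = PySem.Int.mod x 9 := by omega
      by_cases hdm : d = (PySem.Int.mod x 9).toNat
      · subst hdm
        have hset_d : (seen.set (PySem.Int.mod x 9).toNat true).getD (PySem.Int.mod x 9).toNat false = true := by
          rw [List.getD_eq_getElem _ _ (by simpa using hmn)]
          simp
        have hmem : (((PySem.Int.mod x 9).toNat : Int)) ∈ PySem.Int.mod x 9 :: pvDigits (PySem.Int.floordiv x 9) := by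
          rw [hcast]; exact List.mem_cons_self
        rw [hset_d, Bool.true_or, decide_eq_true hmem, Bool.or_true]
      · have hgd : (seen.set (PySem.Int.mod x 9).toNat true).getD d false = seen.getD d false := by
          simp only [List.getD]
          rw [List.getElem?_set_ne (by omega)]
        rw [hgd]
        have hne : ¬ ((d : Int) = PySem.Int.mod x 9) := by omega
        congr 1
        have hiff : ((d : Int) ∈ pvDigits (PySem.Int.floordiv x 9)) ↔
            ((d : Int) ∈ PySem.Int.mod x 9 :: pvDigits (PySem.Int.floordiv x 9)) := by
          rw [List.mem_cons]; tauto
        exact decide_eq_decide.mpr hiff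
    · rw [markLoop, pvDigits]
      simp [h, hlen]

-- fold-min / fold-max facts
theorem pv_foldl_min_le (ds : List Int) : ∀ a : Int,
    ds.foldl min a ≤ a ∧ ∀ y ∈ ds, ds.foldl min a ≤ y := by
  induction ds with
  | nil => intro a; simp
  | cons d t ih =>
    intro a
    obtain ⟨h1, h2⟩ := ih (min a d)
    refine ⟨le_trans h1 (min_le_left _ _), ?_⟩
    intro y hy
    rcases List.mem_cons.mp hy with rfl | hy
    · exact le_trans h1 (min_le_right _ _)
    · exact h2 y hy

theorem pv_foldl_min_mem (ds : List Int) : ∀ a : Int,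
    ds.foldl min a = a ∨ ds.foldl min a ∈ ds := by
  induction ds with
  | nil => intro a; simp
  | cons d t ih =>
    intro a
    rcases ih (min a d) with h | h
    · rw [List.foldl_cons, h]
      rcases le_or_gt a d with hc | hc
      · left; simp [min_def, hc]
      · right; simp [min_def]; omega
    · right; exact List.mem_cons_of_mem _ h

theorem pv_foldl_max_ge (ds : List Int) : ∀ a : Int,
    a ≤ ds.foldl max a ∧ ∀ y ∈ ds, y ≤ ds.foldl max a := by
  induction ds with
  | nil => intro a; simp
  | cons d t ih =>
    intro a
    obtain ⟨h1, h2⟩ := ih (max a d)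
    refine ⟨le_trans (le_max_left _ _) h1, ?_⟩
    intro y hy
    rcases List.mem_cons.mp hy with rfl | hy
    · exact le_trans (le_max_right _ _) h1
    · exact h2 y hy

theorem pv_foldl_max_mem (ds : List Int) : ∀ a : Int,
    ds.foldl max a = a ∨ ds.foldl max a ∈ ds := by
  induction ds with
  | nil => intro a; simp
  | cons d t ih =>
    intro a
    rcases ih (max a d) with h | h
    · rw [List.foldl_cons, h]
      rcases le_or_gt d a with hc | hc
      · left; simp [max_def, hc]
      · right; simp [max_def]; omega
    · right; exact List.mem_cons_of_mem _ h

-- index? of the first true slot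
theorem pv_index?_first (L : List Bool) (k : Nat) (hk : k < L.length)
    (hvk : L.getD k false = true) (hlt : ∀ j, j < k → L.getD j false = false) :
    PySem.List.index? L true = some k := by
  rw [PySem.List.index?_eq_some_iff]
  refine ⟨L.take k, L.drop (k + 1), ?_, by simp [hk.le], ?_⟩
  · have h2 : L.drop k = L[k] :: L.drop (k + 1) := List.drop_eq_getElem_cons hk
    have h3 : L[k] = true := by
      have := hvk; rwa [List.getD_eq_getElem L false hk] at this
    conv_lhs => rw [← List.take_append_drop k L]
    rw [h2, h3]
  · intro hmem
    obtain ⟨i, hi, hgi⟩ := List.mem_iff_getElem.mp hmem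
    have hik : i < k := by
      have := List.length_take_le k L; omega
    have : L.getD i false = true := by
      rw [List.getD_eq_getElem L false (by omega)]
      rw [List.getElem_take] at hgi
      exact hgi.symm ▸ rfl
    rw [hlt i hik] at this
    exact Bool.false_ne_true this

-- ===== VERDICT =====
theorem f_spec : Claim_equal_f := by
  intro x _
  show f x = f_alt x
  by_cases h : x > 0
  case neg =>
    unfold f f_alt
    rw [fLoopA, markLoop]
    simp [h]
  case pos =>
    obtain ⟨hL, hG⟩ := pv_mark_getD x.toNat x (List.replicate 9 false) le_rfl (by simp)
    have hfinal : ∀ d : Nat, d < 9 →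
        (markLoop (List.replicate 9 false) x).getD d false = decide ((d : Int) ∈ pvDigits x) := by
      intro d hd
      rw [hG d hd]
      have hrep : (List.replicate 9 false).getD d false = false := by
        rw [List.getD_eq_getElem _ _ (by simpa using hd)]
        exact List.getElem_replicate _
      rw [hrep]
      simp
    set L := markLoop (List.replicate 9 false) x with hLdef
    have hbounds : ∀ y ∈ pvDigits x, 0 ≤ y ∧ y ≤ 8 := pv_digits_bounds x.toNat x le_rfl
    -- digits nonempty
    have hne : PySem.Int.mod x 9 ∈ pvDigits x := by
      rw [pvDigits]; simp [h]
    set m := (pvDigits x).foldl min 10 with hmdef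
    set M := (pvDigits x).foldl max 0 with hMdef
    obtain ⟨hmle10, hmle⟩ := pv_foldl_min_le (pvDigits x) 10
    obtain ⟨hMge0, hMge⟩ := pv_foldl_max_ge (pvDigits x) 0
    have hmmem : m ∈ pvDigits x := by
      rcases pv_foldl_min_mem (pvDigits x) 10 with hc | hc
      · exfalso
        have h1 := hmle _ hne
        have h2 := (hbounds _ hne).2
        rw [← hmdef] at hc; omega
      · exact hc
    have hMmem : M ∈ pvDigits x := by
      rcases pv_foldl_max_mem (pvDigits x) 0 with hc | hc
      · have h1 := hMge _ hne
        have h2 := (hbounds _ hne).1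
        have h3 : PySem.Int.mod x 9 = 0 := by omega
        rw [hMdef, hc, ← h3]; exact hne
      · exact hc
    have hm09 : 0 ≤ m ∧ m ≤ 8 := hbounds _ hmmem
    have hM09 : 0 ≤ M ∧ M ≤ 8 := hbounds _ hMmem
    have hmM : m ≤ M := le_trans (hmle _ hne) (hMge _ hne)
    -- the first true slot is m
    have hidx_lo : PySem.List.index? L true = some m.toNat := by
      apply pv_index?_first
      · omega
      · rw [hfinal m.toNat (by omega)]
        have : (m.toNat : Int) = m := by omega
        rw [this]; simp [hmmem]
      · intro j hj
        rw [hfinal j (by omega)]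
        simp only [decide_eq_false_iff_not]
        intro hmem
        have := hmle _ hmem
        omega
    -- the reversed list's first true slot is 8 - M
    have hrevlen : L.reverse.length = 9 := by simp [hL]
    have hrevget : ∀ j : Nat, j < 9 → L.reverse.getD j false = L.getD (8 - j) false := by
      intro j hj
      rw [List.getD_eq_getElem _ false (by omega), List.getD_eq_getElem _ false (by omega)]
      rw [List.getElem_reverse]
      congr 1
      omega
    have hidx_hi : PySem.List.index? L.reverse true = some (8 - M.toNat) := by
      apply pv_index?_first
      · omega
      · rw [hrevget _ (by omega)]
        have h88 : 8 - (8 - M.toNat) = M.toNat := by omega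
        rw [h88, hfinal M.toNat (by omega)]
        have : (M.toNat : Int) = M := by omega
        rw [this]; simp [hMmem]
      · intro j hj
        rw [hrevget j (by omega), hfinal (8 - j) (by omega)]
        simp only [decide_eq_false_iff_not]
        intro hmem
        have h1 := hMge _ hmem
        have h2 : ((8 - j : Nat) : Int) = 8 - (j : Int) := by omega
        rw [h2] at h1
        omega
    -- contains true
    have hcontains : L.contains true = true := by
      have : true ∈ L := by
        have h1 : L.getD m.toNat false = true := by
          rw [hfinal m.toNat (by omega)]
          have : (m.toNat : Int) = m := by omega
          rw [this]; simp [hmmem]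
        rw [List.getD_eq_getElem _ false (by omega)] at h1
        exact h1 ▸ List.getElem_mem _
      simpa using this
    -- assemble
    unfold f f_alt
    rw [pv_loop_eq_folds x.toNat x 0 10 le_rfl]
    simp only [← hLdef, hcontains, ← hmdef, ← hMdef]
    rw [PySem.List.slice?_none_none_neg_one]
    simp only [Option.getD_some, hidx_lo, hidx_hi, Bool.true_eq_false, if_false]
    have hcm : ((m.toNat : Nat) : Int) = m := by omega
    have hcM : ((8 - M.toNat : Nat) : Int) = 8 - M := by omega
    rw [hcm, hcM]
    ring
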